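-- pv_equiv track=rewrite | github.com/Kiy0p0N/100-days-of-python | day 8/exercise.py | letter_true
-- ===== SOURCE A (Python) =====
-- def letter_true(name):
--     total_love = 0
--
--     for actual_letter in 'true':
--
--         for letter in name:
--             if letter == actual_letter:
--                 total_love += 1
--             else:
--                 continue
--
--     return total_love
-- ===== SOURCE B (Python) =====
-- def letter_true(name):
--     # Single pass over name: count characters belonging to the target set.
--     # Correct because 'true' has no repeated characters, so summing per-target
--     # counts equals counting membership once per character of name.
--     targets = frozenset('true')
--     total = 0
--     for letter in name:
--         if letter in targets:
--             total += 1
--     return total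
-- ===== Notes on version B (the rewrite author's own statement) =====
-- stated objective: faster
-- what changed: Interchanges the loops: instead of scanning name once per target character (nested loops over 'true' then name), B makes a single pass over name testing membership in the set of target characters; correct because 'true' has no repeated characters.
import Mathlib
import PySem

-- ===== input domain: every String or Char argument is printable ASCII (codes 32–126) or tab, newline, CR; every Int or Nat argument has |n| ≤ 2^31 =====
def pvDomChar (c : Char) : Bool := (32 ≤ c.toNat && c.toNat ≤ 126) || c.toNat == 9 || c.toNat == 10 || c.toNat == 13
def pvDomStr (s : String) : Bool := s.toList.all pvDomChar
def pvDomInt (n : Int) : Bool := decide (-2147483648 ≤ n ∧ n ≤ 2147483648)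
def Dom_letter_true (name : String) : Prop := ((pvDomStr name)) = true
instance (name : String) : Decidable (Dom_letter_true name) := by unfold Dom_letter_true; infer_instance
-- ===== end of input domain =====

-- B interchanges the loops: one pass over name, counting characters in the set {'t','r','u','e'} (alternative decomposition).

-- ===== PORT A =====
def letter_true (name : String) : Int :=
  ("true".toList).foldl (fun total_love actual_letter =>
    (name.toList).foldl (fun acc letter =>
      if letter == actual_letter then acc + 1 else acc) total_love) 0

-- ===== PORT B =====
def letter_true_alt (name : String) : Int :=
  let targets : PySem.Set Char := PySem.Set.ofList "true".toList
  (name.toList).foldl (fun total letter =>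
    if letter ∈ targets then total + 1 else total) 0

-- ===== PRECONDITION & SPEC =====
def Spec_letter_true (name : String) (out : Int) : Prop := out = letter_true_alt name
instance (name : String) (out : Int) : Decidable (Spec_letter_true name out) := by unfold Spec_letter_true; infer_instance

-- ===== CLAIM (what is proved, stated in full; the proofs are below) =====
def Claim_equal_letter_true : Prop := ∀ (name : String), Dom_letter_true name → Spec_letter_true name (letter_true name)

-- ===== LEMMAS AND PROOFS =====
-- Loop interchange is correct because 'true' has distinct characters: each character of name
-- in the target set is counted exactly once on either side.
theorem countP_mem_true_eq_counts (l : List Char) :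
    (l.countP (fun c => decide (c ∈ PySem.Set.ofList ['t','r','u','e'])) : Int)
      = ((l.count 't' : Int) + l.count 'r') + l.count 'u' + l.count 'e' := by
  induction l with
  | nil => simp
  | cons c t ih =>
    simp only [List.countP_cons, List.count_cons]
    push_cast
    rw [ih]
    have hstep : (if decide (c ∈ PySem.Set.ofList ['t','r','u','e']) = true then (1:Int) else 0)
        = (((if (c == 't') = true then (1:Int) else 0) + (if (c == 'r') = true then (1:Int) else 0))
            + (if (c == 'u') = true then (1:Int) else 0)) + (if (c == 'e') = true then (1:Int) else 0) := by
      by_cases h : c ∈ PySem.Set.ofList ['t','r','u','e']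
      · have hc : c = 't' ∨ c = 'r' ∨ c = 'u' ∨ c = 'e' := by
          simpa [PySem.Set.mem_ofList] using h
        rcases hc with rfl | rfl | rfl | rfl <;> simp [h]
      · have hc : ¬(c = 't') ∧ ¬(c = 'r') ∧ ¬(c = 'u') ∧ ¬(c = 'e') := by
          constructor
          · intro hh; exact h (by simp [hh, PySem.Set.mem_ofList])
          constructor
          · intro hh; exact h (by simp [hh, PySem.Set.mem_ofList])
          constructor
          · intro hh; exact h (by simp [hh, PySem.Set.mem_ofList])
          · intro hh; exact h (by simp [hh, PySem.Set.mem_ofList])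
        simp [h, hc.1, hc.2.1, hc.2.2.1, hc.2.2.2]
    rw [hstep]
    ring

-- ===== VERDICT (by name: the statement is the Claim_ definition above) =====
theorem letter_true_spec : Claim_equal_letter_true := by
  intro name _
  unfold Spec_letter_true letter_true letter_true_alt
  simp only [show "true".toList = ['t','r','u','e'] from rfl, List.foldl_cons, List.foldl_nil,
    PySem.List.foldl_beq_add_one, PySem.List.foldl_ite_add_one]
  rw [countP_mem_true_eq_counts]
  ring
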